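-- pv_equiv track=rewrite | github.com/chiragdarji/ai-systems-portfolio | experiments/llm_behavior/tokenization/code.py | make_boundary_preview
-- ===== SOURCE A (Python) =====
-- def make_boundary_preview(decoded_tokens: list[str], max_chars: int = 120) -> str:
--     """Build a readable token-boundary display using | as separator."""
--     segments = []
--     total = 0
--     for tok in decoded_tokens:
--         display = tok.replace("\n", "↵").replace("\t", "→")
--         segments.append(display)
--         total += len(tok)
--         if total >= max_chars:
--             segments.append("…")
--             break
--     return "|".join(segments)
-- ===== SOURCE B (Python) =====
-- def make_boundary_preview(decoded_tokens: list[str], max_chars: int = 120) -> str: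
--     """Build a readable token-boundary display using | as separator."""
--     cums = []
--     run = 0
--     for t in decoded_tokens:
--         run += len(t)
--         cums.append(run)
--     cut = next((i for i, c in enumerate(cums) if c >= max_chars), None)
--     end = len(decoded_tokens) if cut is None else cut + 1
--     parts = [t.replace("\n", "↵").replace("\t", "→") for t in decoded_tokens[:end]]
--     if cut is not None:
--         parts.append("…")
--     return "|".join(parts)
-- ===== Notes on version B (the rewrite author's own statement) =====
-- stated objective: alternative
-- what changed: Replaces the single scan-with-break that accumulates display segments with a prefix-sum table of raw token lengths, a separate search for the first cumulative length reaching max_chars, and a slice-then-map emit pass that appends the ellipsis only when a cut was found.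
import Mathlib
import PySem

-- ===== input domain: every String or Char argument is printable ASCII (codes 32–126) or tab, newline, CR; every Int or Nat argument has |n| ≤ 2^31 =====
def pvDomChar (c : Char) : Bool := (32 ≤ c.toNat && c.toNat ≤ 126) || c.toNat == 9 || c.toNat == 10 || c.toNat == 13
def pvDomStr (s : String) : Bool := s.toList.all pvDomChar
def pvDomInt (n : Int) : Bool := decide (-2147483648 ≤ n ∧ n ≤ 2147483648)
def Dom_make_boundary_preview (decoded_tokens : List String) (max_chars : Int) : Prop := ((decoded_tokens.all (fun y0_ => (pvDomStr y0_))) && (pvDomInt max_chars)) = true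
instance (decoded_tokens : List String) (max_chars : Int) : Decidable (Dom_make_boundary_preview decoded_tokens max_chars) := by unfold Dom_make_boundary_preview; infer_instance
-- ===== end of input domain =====

-- B replaces A's single scan-with-break by a prefix-sum table, a separate cut search, and a slice-map-join emit pass (alternative decomposition, same cost).


-- ===== PORT A =====
-- the for-loop with break, carrying (total, segments)
def mbpLoopA (max_chars : Int) : List String → Int → List String → List String
  | [], _, segments => segments
  | tok :: rest, total, segments =>
    let display := PySem.Str.replace (PySem.Str.replace tok "\n" "↵") "\t" "→"
    let segments := segments ++ [display]
    let total := total + PySem.Str.len tok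
    if max_chars ≤ total then segments ++ ["…"]
    else mbpLoopA max_chars rest total segments

def make_boundary_preview (decoded_tokens : List String) (max_chars : Int) : String :=
  PySem.Str.join "|" (mbpLoopA max_chars decoded_tokens 0 [])

-- ===== PORT B =====
def mbpDisp (t : String) : String := PySem.Str.replace (PySem.Str.replace t "\n" "↵") "\t" "→"

def make_boundary_preview_alt (decoded_tokens : List String) (max_chars : Int) : String :=
  -- prefix sums of raw token lengths (the cums/run loop of Source B)
  let st := decoded_tokens.foldl (fun (p : List Int × Int) t =>
      let run := p.2 + PySem.Str.len t
      (p.1 ++ [run], run)) ([], 0)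
  let cums := st.1
  -- cut = next((i for i, c in enumerate(cums) if c >= max_chars), None)
  let cut : Option Int := ((PySem.List.enumerate cums 0).find? (fun p => decide (max_chars ≤ p.2))).map (·.1)
  let endIdx : Int := match cut with | none => PySem.List.len decoded_tokens | some c => c + 1
  let parts := (PySem.List.slice decoded_tokens none (some endIdx)).map mbpDisp
  let parts := match cut with | none => parts | some _ => parts ++ ["…"]
  PySem.Str.join "|" parts

-- ===== PRECONDITION & SPEC =====
def Spec_make_boundary_preview (decoded_tokens : List String) (max_chars : Int) (out : String) : Prop := out = make_boundary_preview_alt decoded_tokens max_chars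
instance (decoded_tokens : List String) (max_chars : Int) (out : String) : Decidable (Spec_make_boundary_preview decoded_tokens max_chars out) := by unfold Spec_make_boundary_preview; infer_instance

-- ===== CLAIM (what is proved, stated in full; the proofs are below) =====
def Claim_equal_make_boundary_preview : Prop := ∀ (decoded_tokens : List String) (max_chars : Int), Dom_make_boundary_preview decoded_tokens max_chars → Spec_make_boundary_preview decoded_tokens max_chars (make_boundary_preview decoded_tokens max_chars)

-- ===== LEMMAS AND PROOFS =====

-- A's loop is accumulator-shaped: pulled-out prefix
theorem mbpLoopA_append (m : Int) (toks : List String) :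
    ∀ (total : Int) (segs : List String),
      mbpLoopA m toks total segs = segs ++ mbpLoopA m toks total [] := by
  induction toks with
  | nil => intro total segs; simp [mbpLoopA]
  | cons t r ih =>
    intro total segs
    simp only [mbpLoopA, List.nil_append]
    split_ifs with h
    · simp
    · rw [ih, ih (total + PySem.Str.len t) [_]]; simp

-- pure prefix sums of raw token lengths starting from base
def mbpCums (base : Int) : List String → List Int
  | [] => []
  | t :: r => (base + PySem.Str.len t) :: mbpCums (base + PySem.Str.len t) r

theorem mbpFoldl_cums (toks : List String) :
    ∀ (acc : List Int) (base : Int),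
      (toks.foldl (fun (p : List Int × Int) t =>
        let run := p.2 + PySem.Str.len t
        (p.1 ++ [run], run)) (acc, base)) = (acc ++ mbpCums base toks, base + (toks.map PySem.Str.len).sum) := by
  induction toks with
  | nil => intro acc base; simp [mbpCums]
  | cons t r ih =>
    intro acc base
    simp only [List.foldl_cons, mbpCums]
    rw [ih]
    simp only [Prod.mk.injEq, List.append_assoc, List.singleton_append, List.map_cons,
      List.sum_cons]
    exact ⟨by trivial, by ring⟩

-- the generator-with-next search = findIdx? shifted by the enumerate start
theorem mbpFind_enumerate (m : Int) (l : List Int) :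
    ∀ (s : Int),
      (((PySem.List.enumerate l s).find? (fun p => decide (m ≤ p.2))).map (·.1)) =
        ((l.findIdx? (fun c => decide (m ≤ c))).map (fun n : Nat => ((n : Int) + s))) := by
  induction l with
  | nil => intro s; simp [PySem.List.enumerate_nil]
  | cons c r ih =>
    intro s
    rw [PySem.List.enumerate_cons, List.findIdx?_cons]
    by_cases h : m ≤ c
    · rw [List.find?_cons_of_pos (by simpa using h), if_pos (by simpa using h)]
      simp
    · rw [List.find?_cons_of_neg (by simpa using h), if_neg (by simpa using h), ih (s + 1)]
      cases hr : r.findIdx? (fun c => decide (m ≤ c)) with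
      | none => simp
      | some a => simp; ring

-- the list of parts that B assembles, written over mbpCums
def mbpParts (m : Int) (toks : List String) (base : Int) : List String :=
  match (mbpCums base toks).findIdx? (fun c => decide (m ≤ c)) with
  | none => toks.map mbpDisp
  | some k => (toks.take (k + 1)).map mbpDisp ++ ["…"]

-- A's loop body produces exactly B's parts, for any starting total
theorem mbpLoopA_eq_parts (m : Int) (toks : List String) :
    ∀ (base : Int), mbpLoopA m toks base [] = mbpParts m toks base := by
  induction toks with
  | nil => intro base; simp [mbpLoopA, mbpParts, mbpCums]
  | cons t r ih =>
    intro base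
    simp only [mbpLoopA, mbpParts, mbpCums, List.findIdx?_cons, decide_eq_true_eq,
      List.nil_append]
    by_cases h : m ≤ base + PySem.Str.len t
    · have h' : m ≤ base + (t.length : Int) := by simpa using h
      simp [h', mbpDisp]
    · rw [if_neg h, if_neg h, mbpLoopA_append, ih (base + PySem.Str.len t)]
      unfold mbpParts
      cases hr : (mbpCums (base + PySem.Str.len t) r).findIdx? (fun c => decide (m ≤ c)) with
      | none => simp [mbpDisp]
      | some k => simp [mbpDisp]

-- ===== VERDICT (by name: the statement is the Claim_ definition above) =====
theorem make_boundary_preview_spec : Claim_equal_make_boundary_preview := by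
  intro toks m _
  unfold Spec_make_boundary_preview make_boundary_preview make_boundary_preview_alt
  rw [mbpFoldl_cums toks [] 0]
  simp only [List.nil_append]
  rw [mbpFind_enumerate m (mbpCums 0 toks) 0, mbpLoopA_eq_parts m toks 0]
  unfold mbpParts
  cases hr : (mbpCums 0 toks).findIdx? (fun c => decide (m ≤ c)) with
  | none =>
    simp only [Option.map_none, PySem.List.len_eq, PySem.List.slice_to_natCast,
      List.take_length]
  | some k =>
    simp only [Option.map_some]
    have hcast : ((k : Int) + 0) + 1 = ((k + 1 : Nat) : Int) := by push_cast; ring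
    rw [hcast, PySem.List.slice_to_natCast]
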